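-- pv_equiv track=rewrite | github.com/shaneholloman/huggingface-ai-trainer | src/autotrain/rendering/utils.py | preprocess_messages_for_tool_role
-- ===== SOURCE A (Python) =====
-- from typing import Any, Dict, List, Optional, Union
--
-- def preprocess_messages_for_tool_role(messages: List[Dict[str, str]]) -> List[Dict[str, str]]:
--     """Preprocess messages to handle 'tool' role for tokenizers that don't support it.
--
--     This function:
--     1. Converts 'tool' role to 'user' role with [Tool Result] prefix
--     2. Merges consecutive same-role messages to maintain strict alternation
--
--     Args:
--         messages: List of message dicts with 'role' and 'content' keys
--
--     Returns:
--         Preprocessed messages compatible with strict-alternation tokenizers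
--     """
--     if not messages:
--         return messages
--
--     processed = []
--     for msg in messages:
--         role = msg.get("role", "user")
--         content = msg.get("content") or ""
--
--         # Convert 'tool' or 'function' role to 'user' (tool responses are external input like user messages)
--         # Note: 'function' is the older OpenAI format, 'tool' is the newer format
--         if role in ("tool", "function"):
--             role = "user"
--             content = f"[Tool Result] {content}"
--
--         # Check if we need to merge with previous message (same role after conversion)
--         if processed and processed[-1]["role"] == role:
--             # Merge consecutive same-role messages
--             processed[-1]["content"] = f"{processed[-1]['content']}\n\n{content}"
--         else:
--             processed.append({"role": role, "content": content})
--
--     return processed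
-- ===== SOURCE B (Python) =====
-- from typing import Dict, List
--
--
-- def preprocess_messages_for_tool_role(messages: List[Dict[str, str]]) -> List[Dict[str, str]]:
--     """Divide and conquer: solve each half into merged groups, then join the
--     two group lists, fusing at the boundary when the roles match."""
--     if not messages:
--         return messages
--
--     def norm(msg):
--         role = msg.get("role", "user")
--         content = msg.get("content") or ""
--         if role in ("tool", "function"):
--             return "user", "[Tool Result] " + content
--         return role, content
--
--     def solve(lo, hi):
--         if hi - lo == 1:
--             role, content = norm(messages[lo])
--             return [{"role": role, "content": content}]
--         mid = (lo + hi) // 2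
--         left = solve(lo, mid)
--         right = solve(mid, hi)
--         if left[-1]["role"] == right[0]["role"]:
--             merged = {"role": left[-1]["role"],
--                       "content": left[-1]["content"] + "\n\n" + right[0]["content"]}
--             return left[:-1] + [merged] + right[1:]
--         return left + right
--
--     return solve(0, len(messages))
-- ===== Notes on version B (the rewrite author's own statement) =====
-- stated objective: alternative
-- what changed: Replaces A's single forward loop that appends/mutates the last dict with a divide-and-conquer: recursively solve each half of the message list into merged groups, then concatenate the two group lists, fusing at the boundary when the last left group and first right group share a role (correct because run-merging is an associative combine).
import Mathlib
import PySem

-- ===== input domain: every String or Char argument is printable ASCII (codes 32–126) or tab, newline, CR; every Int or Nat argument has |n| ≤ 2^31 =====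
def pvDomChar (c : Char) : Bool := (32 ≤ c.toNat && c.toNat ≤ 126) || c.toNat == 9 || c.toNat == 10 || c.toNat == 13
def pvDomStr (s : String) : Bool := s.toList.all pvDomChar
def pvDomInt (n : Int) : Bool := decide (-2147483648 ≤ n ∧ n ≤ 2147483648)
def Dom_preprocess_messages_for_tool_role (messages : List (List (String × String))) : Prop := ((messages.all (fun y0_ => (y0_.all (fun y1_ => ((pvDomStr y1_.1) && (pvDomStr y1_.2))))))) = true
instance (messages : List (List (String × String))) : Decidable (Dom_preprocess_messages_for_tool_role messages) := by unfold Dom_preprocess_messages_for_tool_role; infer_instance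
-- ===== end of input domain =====

-- B replaces A's single forward loop (mutate the last appended dict) by a divide-and-conquer:
-- solve each half into merged groups and fuse the two group lists at the boundary (alternative; same cost).

-- ===== PORT A =====
-- msg.get(k, dflt) on an association-list dict: first matching key, else the default (exact).
def pvGetD (d : List (String × String)) (k dflt : String) : String :=
  match d.find? (fun p => p.1 == k) with
  | some p => p.2
  | none => dflt

-- d["content"] = c on an association-list dict: overwrite the first "content" entry in place (exact;
-- A only applies it to dicts it built itself, which always carry a "content" key).
def pvSetContent : List (String × String) → String → List (String × String)
  | [], _ => []
  | p :: t, c => if p.1 == "content" then (p.1, c) :: t else p :: pvSetContent t c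

-- one iteration of A's for-loop; `processed` is kept reversed (head = processed[-1]), reversed back at the end.
-- processed[-1]["role"] is a plain lookup on a dict that always has the key; ported with default "" (exact here).
def pvA_step (processed : List (List (String × String))) (msg : List (String × String)) :
    List (List (String × String)) :=
  let role := pvGetD msg "role" "user"
  let content := pvGetD msg "content" ""
  let rc := if role == "tool" || role == "function" then ("user", "[Tool Result] " ++ content)
            else (role, content)
  match processed with
  | last :: rest =>
      if pvGetD last "role" "" == rc.1 then
        pvSetContent last (pvGetD last "content" "" ++ "\n\n" ++ rc.2) :: rest
      else
        [("role", rc.1), ("content", rc.2)] :: last :: rest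
  | [] => [[("role", rc.1), ("content", rc.2)]]

def preprocess_messages_for_tool_role (messages : List (List (String × String))) :
    List (List (String × String)) :=
  if messages.isEmpty then messages
  else (messages.foldl pvA_step []).reverse

-- ===== PORT B =====
-- Source B's norm(msg): the normalized (role, content) pair.
def pvNorm (msg : List (String × String)) : String × String :=
  let role := pvGetD msg "role" "user"
  let content := pvGetD msg "content" ""
  if role == "tool" || role == "function" then ("user", "[Tool Result] " ++ content)
  else (role, content)

-- Source B's boundary combine: fuse left[-1] with right[0] when their roles agree, else concatenate.
def pvCombine (L R : List (List (String × String))) : List (List (String × String)) :=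
  match L.getLast?, R with
  | some last, first :: rtail =>
      if pvGetD last "role" "" == pvGetD first "role" "" then
        L.dropLast ++
          [("role", pvGetD last "role" ""),
           ("content", pvGetD last "content" "" ++ "\n\n" ++ pvGetD first "content" "")] :: rtail
      else L ++ R
  | _, _ => L ++ R

-- Source B's solve(lo, hi), carried on the sublist messages[lo:hi] (the midpoint split is the same:
-- (lo+hi)//2 - lo = (hi-lo)//2). solve is never called on an empty range; [] => [] is unreachable.
def pvSolve (l : List (List (String × String))) : List (List (String × String)) :=
  match l with
  | [] => []
  | [m] => [[("role", (pvNorm m).1), ("content", (pvNorm m).2)]]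
  | a :: b :: t =>
      pvCombine (pvSolve ((a :: b :: t).take ((a :: b :: t).length / 2)))
                (pvSolve ((a :: b :: t).drop ((a :: b :: t).length / 2)))
termination_by l.length
decreasing_by
  · simp only [List.length_take, List.length_cons]; omega
  · simp only [List.length_drop, List.length_cons]; omega

def preprocess_messages_for_tool_role_alt (messages : List (List (String × String))) :
    List (List (String × String)) :=
  if messages.isEmpty then messages
  else pvSolve messages

-- ===== PRECONDITION & SPEC =====
def Spec_preprocess_messages_for_tool_role (messages : List (List (String × String))) (out : List (List (String × String))) : Prop := out = preprocess_messages_for_tool_role_alt messages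
instance (messages : List (List (String × String))) (out : List (List (String × String))) : Decidable (Spec_preprocess_messages_for_tool_role messages out) := by unfold Spec_preprocess_messages_for_tool_role; infer_instance

-- ===== CLAIM (what is proved, stated in full; the proofs are below) =====
def Claim_equal_preprocess_messages_for_tool_role : Prop := ∀ (messages : List (List (String × String))), Dom_preprocess_messages_for_tool_role messages → Spec_preprocess_messages_for_tool_role messages (preprocess_messages_for_tool_role messages)

-- ===== LEMMAS AND PROOFS =====

-- "\n\n".join of a list of strings (proof-side reference function).
def pvJoin : List String → String
  | [] => ""
  | [c] => c
  | c :: t => c ++ "\n\n" ++ pvJoin t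

-- reference result: one group per maximal run of equal roles, contents joined.
def pvGroups : List (String × String) → List (List (String × String))
  | [] => []
  | (r, c) :: t =>
      [("role", r), ("content", pvJoin (c :: (t.takeWhile (fun p => p.1 == r)).map (·.2)))] ::
        pvGroups (t.dropWhile (fun p => p.1 == r))
termination_by l => l.length
decreasing_by
  simp only [List.length_cons]
  have := List.length_dropWhile_le (fun p => p.1 == r) t
  omega

-- A's loop step, uncurried over the normalized pair.
def pvStep' (processed : List (List (String × String))) (p : String × String) :
    List (List (String × String)) :=
  match processed with
  | last :: rest =>
      if pvGetD last "role" "" == p.1 then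
        pvSetContent last (pvGetD last "content" "" ++ "\n\n" ++ p.2) :: rest
      else
        [("role", p.1), ("content", p.2)] :: last :: rest
  | [] => [[("role", p.1), ("content", p.2)]]

theorem pvA_step_eq (acc : List (List (String × String))) (msg : List (String × String)) :
    pvA_step acc msg = pvStep' acc (pvNorm msg) := rfl

theorem pvGetD_role (r c d : String) : pvGetD [("role", r), ("content", c)] "role" d = r := rfl

theorem pvGetD_content (r c d : String) :
    pvGetD [("role", r), ("content", c)] "content" d = c := rfl

theorem pvSetContent_pair (r c c' : String) :
    pvSetContent [("role", r), ("content", c)] c' = [("role", r), ("content", c')] := rfl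

theorem pvJoin_cons (a : String) (xs : List String) (h : xs ≠ []) :
    pvJoin (a :: xs) = a ++ "\n\n" ++ pvJoin xs := by
  cases xs with
  | nil => exact absurd rfl h
  | cons b t => rfl

theorem pvJoin_shift (a b : String) (xs : List String) :
    pvJoin ((a ++ "\n\n" ++ b) :: xs) = pvJoin (a :: b :: xs) := by
  cases xs with
  | nil => rfl
  | cons x t => simp [pvJoin, String.append_assoc]

theorem pvJoin_append (xs ys : List String) (hx : xs ≠ []) (hy : ys ≠ []) :
    pvJoin (xs ++ ys) = pvJoin xs ++ "\n\n" ++ pvJoin ys := by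
  induction xs with
  | nil => exact absurd rfl hx
  | cons a t ih =>
      cases t with
      | nil => simpa using pvJoin_cons a ys hy
      | cons b u =>
          rw [List.cons_append, pvJoin_cons a _ (by simp),
            pvJoin_cons a (b :: u) (by simp), ih (by simp)]
          simp [String.append_assoc]

-- A's fold produces the reference groups.
theorem foldl_pvStep' (ps : List (String × String)) :
    ∀ (r c : String) (rest : List (List (String × String))),
      (ps.foldl pvStep' ([("role", r), ("content", c)] :: rest)).reverse
        = rest.reverse ++
          [("role", r), ("content",
              pvJoin (c :: (ps.takeWhile (fun p => p.1 == r)).map (·.2)))] ::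
            pvGroups (ps.dropWhile (fun p => p.1 == r)) := by
  induction ps with
  | nil => intro r c rest; simp [pvGroups, pvJoin]
  | cons hd t ih =>
      intro r c rest
      obtain ⟨r', c'⟩ := hd
      by_cases h : (r' == r) = true
      · have hrr : (r == r') = true := by
          have := eq_of_beq h; subst this; exact beq_self_eq_true r'
        simp only [List.foldl_cons, pvStep', pvGetD_role, pvGetD_content, hrr, if_pos,
          pvSetContent_pair]
        rw [ih (r := r) (c := c ++ "\n\n" ++ c') (rest := rest)]
        simp only [List.takeWhile_cons, List.dropWhile_cons, h, if_pos, List.map_cons]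
        rw [pvJoin_shift]
      · have hr : (r' == r) = false := by simpa using h
        have hrr : (r == r') = false := by
          exact beq_eq_false_iff_ne.mpr (fun e => (beq_eq_false_iff_ne.mp hr) e.symm)
        simp only [List.foldl_cons, pvStep', pvGetD_role, hrr, Bool.false_eq_true, if_neg,
          not_false_eq_true]
        rw [ih (r := r') (c := c') (rest := [("role", r), ("content", c)] :: rest)]
        simp [pvGroups, hr, pvJoin, List.append_assoc]

theorem pvGroups_ne_nil (ps : List (String × String)) (h : ps ≠ []) : pvGroups ps ≠ [] := by
  cases ps with
  | nil => exact absurd rfl h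
  | cons p t => obtain ⟨r, c⟩ := p; simp [pvGroups]

theorem pvCombine_cons (g : List (String × String)) (G Q : List (List (String × String)))
    (h : G ≠ []) : pvCombine (g :: G) Q = g :: pvCombine G Q := by
  cases G with
  | nil => exact absurd rfl h
  | cons b u =>
      unfold pvCombine
      rw [List.getLast?_cons_cons]
      cases hG : (b :: u).getLast? with
      | none => exact absurd (List.getLast?_eq_none_iff.mp hG) (by simp)
      | some last =>
          cases Q with
          | nil => simp
          | cons first rtail =>
              by_cases hr : (pvGetD last "role" "" == pvGetD first "role" "") = true
              · simp [hr, List.dropLast_cons₂]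
              · simp [hr]

-- the key fact: the reference groups of an append are the combine of the groups.
theorem pvGroups_append : ∀ (n : ℕ) (ps qs : List (String × String)), ps.length ≤ n →
    ps ≠ [] → qs ≠ [] → pvGroups (ps ++ qs) = pvCombine (pvGroups ps) (pvGroups qs) := by
  intro n
  induction n with
  | zero => intro ps qs hlen hp _; cases ps with
      | nil => exact absurd rfl hp
      | cons a t => simp at hlen
  | succ n ih =>
      intro ps qs hlen hp hq
      cases ps with
      | nil => exact absurd rfl hp
      | cons p t =>
          obtain ⟨r, c⟩ := p
          by_cases hrest : t.dropWhile (fun p => p.1 == r) = []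
          · -- t is entirely role r: the whole left side is one run
            have htake : t.takeWhile (fun p => p.1 == r) = t := by
              have := List.takeWhile_append_dropWhile (p := fun p => p.1 == r) (l := t)
              rw [hrest, List.append_nil] at this; exact this
            have hall : ∀ x ∈ t, (x.1 == r) = true := by
              intro x hx
              have hx' : x ∈ t.takeWhile (fun p => p.1 == r) := by rw [htake]; exact hx
              exact List.mem_takeWhile_imp (p := fun q : String × String => q.1 == r) hx'
            cases qs with
            | nil => exact absurd rfl hq
            | cons q u =>
                obtain ⟨r2, c2⟩ := q
                by_cases h2 : (r2 == r) = true
                · -- boundary roles match: fuse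
                  have e2 : r2 = r := eq_of_beq h2
                  subst e2
                  rw [show ((r2, c) :: t) ++ ((r2, c2) :: u) = (r2, c) :: (t ++ (r2, c2) :: u) by rfl]
                  simp only [pvGroups]
                  rw [List.takeWhile_append_of_pos hall, List.dropWhile_append_of_pos hall]
                  simp only [pvGroups, htake, hrest, List.takeWhile_cons, List.dropWhile_cons,
                    beq_self_eq_true, if_pos, List.map_cons, List.map_append]
                  unfold pvCombine
                  simp only [List.getLast?_singleton, pvGetD_role, pvGetD_content,
                    beq_self_eq_true, if_pos]
                  have hJ : pvJoin (c :: (t.map (·.2) ++ c2 ::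
                        (u.takeWhile (fun a => a.1 == r2)).map (·.2)))
                    = pvJoin (c :: t.map (·.2)) ++ "\n\n" ++
                      pvJoin (c2 :: (u.takeWhile (fun a => a.1 == r2)).map (·.2)) := by
                    rw [pvJoin_cons c _ (by simp)]
                    cases t with
                    | nil => simp [pvJoin]
                    | cons p' t' =>
                        rw [pvJoin_append _ _ (by simp) (by simp),
                          pvJoin_cons c _ (by simp)]
                        simp [String.append_assoc]
                  simp [List.dropLast, hJ]
                · -- boundary roles differ: plain concatenation
                  have h2' : ((r2, c2).1 == r) = false := by simpa using h2
                  rw [show ((r, c) :: t) ++ ((r2, c2) :: u) = (r, c) :: (t ++ (r2, c2) :: u) by rfl]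
                  simp only [pvGroups]
                  rw [List.takeWhile_append_of_pos hall, List.dropWhile_append_of_pos hall]
                  simp only [pvGroups, htake, hrest, List.takeWhile_cons, List.dropWhile_cons, h2',
                    Bool.false_eq_true, if_neg, not_false_eq_true]
                  unfold pvCombine
                  have h2n : r2 ≠ r := by simpa using h2
                  have hne : (r == r2) = false :=
                    beq_eq_false_iff_ne.mpr (fun e => h2n e.symm)
                  simp [pvGetD_role, hne]
          · -- the first run ends inside t: peel it off on both sides
            have hlen0 : (t.takeWhile (fun p => p.1 == r)).length ≠ t.length := by
              intro hEq
              have hlt := congrArg List.length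
                (List.takeWhile_append_dropWhile (p := fun p => p.1 == r) (l := t))
              rw [List.length_append, hEq] at hlt
              exact hrest (List.length_eq_zero_iff.mp (by omega))
            have htk : (t ++ qs).takeWhile (fun p => p.1 == r) = t.takeWhile (fun p => p.1 == r) := by
              rw [List.takeWhile_append, if_neg hlen0]
            have hdr : (t ++ qs).dropWhile (fun p => p.1 == r) = t.dropWhile (fun p => p.1 == r) ++ qs := by
              rw [List.dropWhile_append, if_neg (by simp [hrest])]
            rw [show ((r, c) :: t) ++ qs = (r, c) :: (t ++ qs) by rfl]
            simp only [pvGroups, htk, hdr]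
            have hlen' : (t.dropWhile (fun p => p.1 == r)).length ≤ n := by
              have h1 := List.length_dropWhile_le (fun p => p.1 == r) t
              simp only [List.length_cons] at hlen; omega
            rw [ih _ qs hlen' hrest hq,
                pvCombine_cons _ _ _ (pvGroups_ne_nil _ hrest)]

-- B's divide and conquer also produces the reference groups.
theorem pvSolve_eq : ∀ (n : ℕ) (l : List (List (String × String))), l.length ≤ n → l ≠ [] →
    pvSolve l = pvGroups (l.map pvNorm) := by
  intro n
  induction n with
  | zero => intro l hlen hl; cases l with
      | nil => exact absurd rfl hl
      | cons a t => simp at hlen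
  | succ n ih =>
      intro l hlen hl
      match l with
      | [] => exact absurd rfl hl
      | [m] =>
          rcases hp : pvNorm m with ⟨r, c⟩
          simp [pvSolve, pvGroups, hp, pvJoin]
      | a :: b :: t =>
          rw [pvSolve]
          set L := a :: b :: t with hL
          have hlen2 : 2 ≤ L.length := by simp [hL]
          have hmid1 : 1 ≤ L.length / 2 := by omega
          have hmidlt : L.length / 2 < L.length := by omega
          have htne : L.take (L.length / 2) ≠ [] := by
            intro h; have := congrArg List.length h
            simp [List.length_take] at this; omega
          have hdne : L.drop (L.length / 2) ≠ [] := by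
            intro h; have := congrArg List.length h
            simp [List.length_drop] at this; omega
          have hlt : (L.take (L.length / 2)).length ≤ n := by
            simp [List.length_take]; omega
          have hld : (L.drop (L.length / 2)).length ≤ n := by
            simp [List.length_drop]
            simp only [hL, List.length_cons] at hlen ⊢; omega
          rw [ih _ hlt htne, ih _ hld hdne,
              ← pvGroups_append ((L.take (L.length / 2)).map pvNorm).length _ _ le_rfl
                (by simpa using htne) (by simpa using hdne),
              ← List.map_append, List.take_append_drop]

-- ===== VERDICT (by name: the statement is the Claim_ definition above) =====
theorem preprocess_messages_for_tool_role_spec : Claim_equal_preprocess_messages_for_tool_role := by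
  intro messages _
  unfold Spec_preprocess_messages_for_tool_role
  unfold preprocess_messages_for_tool_role preprocess_messages_for_tool_role_alt
  cases messages with
  | nil => rfl
  | cons m ms =>
      simp only [List.isEmpty_cons, Bool.false_eq_true, if_neg, not_false_eq_true]
      have hfold : (m :: ms).foldl pvA_step [] = ((m :: ms).map pvNorm).foldl pvStep' [] := by
        rw [List.foldl_map]
        exact List.foldl_ext _ _ _ (fun a x _ => (pvA_step_eq a x))
      rw [pvSolve_eq (m :: ms).length _ le_rfl (by simp), hfold]
      rcases hp : pvNorm m with ⟨r, c⟩
      simp only [List.map_cons, List.foldl_cons, hp]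
      have h0 : pvStep' [] (r, c) = [[("role", r), ("content", c)]] := rfl
      rw [h0, foldl_pvStep']
      simp [pvGroups]
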